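-- pv_equiv track=rewrite | github.com/pangjin-tan/fs-lcg | solver3.py | init_asgn
-- ===== SOURCE A (Python) =====
-- def init_asgn(assignment_data, sailing_data):
--     asgn = {}
--     y_ones = []
--     # assign each request to the cheapest sailing
--     for _, data in assignment_data.items():
--         request = data['request']
--         sailing = data['sailing']
--         if request not in asgn:
--             asgn[request] = sailing
--         else:
--             curr_sailing = asgn[request]
--             if sailing_data[sailing]['cost'] < sailing_data[curr_sailing]['cost']:
--                 asgn[request] = sailing
--     y_ones = [[request, sailing] for request, sailing in asgn.items()]
--     return y_ones
-- ===== SOURCE B (Python) =====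
-- def _cheapest(sailings, sailing_data):
--     # first-wins on ties, like A's strict '<'; no cost lookup for a singleton group
--     best = sailings[0]
--     for s in sailings[1:]:
--         if sailing_data[s]['cost'] < sailing_data[best]['cost']:
--             best = s
--     return best
--
-- def init_asgn(assignment_data, sailing_data):
--     # group the sailings of each request in one pass, in first-appearance order
--     groups = {}
--     for data in assignment_data.values():
--         groups.setdefault(data['request'], []).append(data['sailing'])
--     # then pick each group's cheapest sailing in a separate reduction pass
--     return [[request, _cheapest(sailings, sailing_data)]
--             for request, sailings in groups.items()]
-- ===== Notes on version B (the rewrite author's own statement) =====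
-- stated objective: alternative
-- what changed: A keeps a running cheapest-sailing dict updated with a strict '<' comparison inside the single loop; B first groups each request's sailings in one pass and then reduces each group to its cheapest sailing in a separate pass, moving the cost comparison out of the main loop.
import Mathlib
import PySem

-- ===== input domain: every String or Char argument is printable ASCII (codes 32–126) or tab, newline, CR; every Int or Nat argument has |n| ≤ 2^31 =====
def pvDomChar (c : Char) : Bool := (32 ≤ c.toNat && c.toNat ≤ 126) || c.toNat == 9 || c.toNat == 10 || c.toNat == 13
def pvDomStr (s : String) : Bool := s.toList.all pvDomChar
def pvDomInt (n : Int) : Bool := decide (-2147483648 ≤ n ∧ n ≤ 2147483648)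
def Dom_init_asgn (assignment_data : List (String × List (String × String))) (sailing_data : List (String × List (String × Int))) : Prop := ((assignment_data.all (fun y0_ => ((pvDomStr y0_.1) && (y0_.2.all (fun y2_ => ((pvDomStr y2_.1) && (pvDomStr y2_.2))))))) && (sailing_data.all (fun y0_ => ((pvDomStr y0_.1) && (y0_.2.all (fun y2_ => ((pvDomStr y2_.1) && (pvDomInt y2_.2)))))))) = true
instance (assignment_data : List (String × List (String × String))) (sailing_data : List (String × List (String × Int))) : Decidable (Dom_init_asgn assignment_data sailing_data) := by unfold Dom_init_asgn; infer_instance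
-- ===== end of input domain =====

-- ===== PORT A =====
-- B replaces A's running-min accumulator by a group-then-reduce pass; return values proved equal on Pre_.
-- shared helpers: Python dict lookups data[k] / sailing_data[s]['cost'] on the association-list encoding
def pvGetS (d : List (String × String)) (k : String) : String :=
  (PySem.Dict.mk d).getD k ""

def pvCost (sailing_data : List (String × List (String × Int))) (s : String) : Int :=
  (PySem.Dict.mk ((PySem.Dict.mk sailing_data).getD s [])).getD "cost" 0

def init_asgn (assignment_data : List (String × List (String × String))) (sailing_data : List (String × List (String × Int))) : List (List String) :=
  let asgn : PySem.Dict String String :=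
    assignment_data.foldl (fun asgn kv =>
      let request := pvGetS kv.2 "request"
      let sailing := pvGetS kv.2 "sailing"
      match asgn.get? request with
      | none => asgn.insert request sailing
      | some curr_sailing =>
        if pvCost sailing_data sailing < pvCost sailing_data curr_sailing then
          asgn.insert request sailing
        else asgn)
      PySem.Dict.empty
  asgn.items.map (fun p => [p.1, p.2])

-- ===== PORT B =====
-- port of Source B's _cheapest: linear reduction of a group; [] is unreachable (groups are nonempty)
def pvCheapest (sailings : List String) (sailing_data : List (String × List (String × Int))) : String :=
  match sailings with
  | [] => ""
  | best :: rest =>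
    rest.foldl (fun best s =>
      if pvCost sailing_data s < pvCost sailing_data best then s else best) best

def init_asgn_alt (assignment_data : List (String × List (String × String))) (sailing_data : List (String × List (String × Int))) : List (List String) :=
  let groups : PySem.Dict String (List String) :=
    assignment_data.foldl (fun groups kv =>
      groups.modify (pvGetS kv.2 "request") [] (fun ss => ss ++ [pvGetS kv.2 "sailing"]))
      PySem.Dict.empty
  groups.items.map (fun p => [p.1, pvCheapest p.2 sailing_data])

-- ===== PRECONDITION & SPEC =====
-- Pre_ excludes exactly the inputs on which Python A raises KeyError (an entry lacking a
-- 'request'/'sailing' key, or a missing sailing/'cost' entry for a sailing of a request that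
-- occurs at least twice — only those sailings' costs are ever read), and the duplicate-key
-- association lists that do not encode a Python dict (Python-side inputs are dicts, so these
-- never arise there).
def Pre_init_asgn (assignment_data : List (String × List (String × String))) (sailing_data : List (String × List (String × Int))) : Prop :=
  (assignment_data.map (fun kv => kv.1)).Nodup ∧
  (sailing_data.map (fun kv => kv.1)).Nodup ∧
  (∀ kv ∈ assignment_data, (kv.2.map (fun p => p.1)).Nodup) ∧
  (∀ kv ∈ sailing_data, (kv.2.map (fun p => p.1)).Nodup) ∧
  (∀ kv ∈ assignment_data,
    (PySem.Dict.mk kv.2).contains "request" = true ∧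
    (PySem.Dict.mk kv.2).contains "sailing" = true) ∧
  (∀ kv ∈ assignment_data,
    1 < (assignment_data.filter
          (fun kv' => pvGetS kv'.2 "request" == pvGetS kv.2 "request")).length →
    (PySem.Dict.mk sailing_data).contains (pvGetS kv.2 "sailing") = true ∧
    (PySem.Dict.mk ((PySem.Dict.mk sailing_data).getD (pvGetS kv.2 "sailing") [])).contains "cost" = true)

instance (assignment_data : List (String × List (String × String))) (sailing_data : List (String × List (String × Int))) : Decidable (Pre_init_asgn assignment_data sailing_data) := by unfold Pre_init_asgn; infer_instance

def pvWitness_init_asgn : (List (String × List (String × String))) × (List (String × List (String × Int))) :=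
  ([("a", [("request", "r"), ("sailing", "s")]), ("b", [("request", "r"), ("sailing", "t")])],
   [("s", [("cost", 5)]), ("t", [("cost", 3)])])

def Spec_init_asgn (assignment_data : List (String × List (String × String))) (sailing_data : List (String × List (String × Int))) (out : List (List String)) : Prop := out = init_asgn_alt assignment_data sailing_data
instance (assignment_data : List (String × List (String × String))) (sailing_data : List (String × List (String × Int))) (out : List (List String)) : Decidable (Spec_init_asgn assignment_data sailing_data out) := by unfold Spec_init_asgn; infer_instance

-- ===== CLAIM (what is proved, stated in full; the proofs are below) =====
def Claim_equal_init_asgn : Prop := ∀ (assignment_data : List (String × List (String × String))) (sailing_data : List (String × List (String × Int))), Dom_init_asgn assignment_data sailing_data → Pre_init_asgn assignment_data sailing_data → Spec_init_asgn assignment_data sailing_data (init_asgn assignment_data sailing_data)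

-- ===== LEMMAS AND PROOFS =====

-- A's dict is B's dict with every group replaced by its cheapest sailing
def pvMapD (sailing_data : List (String × List (String × Int))) (g : PySem.Dict String (List String)) : PySem.Dict String String :=
  PySem.Dict.mk (g.items.map (fun q => (q.1, pvCheapest q.2 sailing_data)))

lemma pvCheapest_append_singleton (sailing_data : List (String × List (String × Int))) (ss : List String) (s : String) (hne : ss ≠ []) :
    pvCheapest (ss ++ [s]) sailing_data =
      if pvCost sailing_data s < pvCost sailing_data (pvCheapest ss sailing_data) then s
      else pvCheapest ss sailing_data := by
  cases ss with
  | nil => exact absurd rfl hne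
  | cons h t => simp [pvCheapest, List.foldl_append]

lemma pvGet?_mapD (sailing_data : List (String × List (String × Int))) (g : PySem.Dict String (List String)) (r : String) :
    (pvMapD sailing_data g).get? r = (g.get? r).map (fun ss => pvCheapest ss sailing_data) := by
  obtain ⟨l⟩ := g
  induction l with
  | nil => rfl
  | cons q t ih =>
    obtain ⟨k, v⟩ := q
    show (PySem.Dict.mk (((k, v) :: t).map (fun q => (q.1, pvCheapest q.2 sailing_data)))).get? r
        = Option.map (fun ss => pvCheapest ss sailing_data) ((PySem.Dict.mk ((k, v) :: t)).get? r)
    simp only [List.map_cons, PySem.Dict.get?_mk_cons]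
    split
    · rfl
    · exact ih

lemma pvStep_eq (sailing_data : List (String × List (String × Int))) (g : PySem.Dict String (List String))
    (hnd : g.keys.Nodup) (hne : ∀ p ∈ g.items, p.2 ≠ []) (r s : String) :
    (match (pvMapD sailing_data g).get? r with
     | none => (pvMapD sailing_data g).insert r s
     | some curr =>
       if pvCost sailing_data s < pvCost sailing_data curr then
         (pvMapD sailing_data g).insert r s
       else pvMapD sailing_data g)
    = pvMapD sailing_data (g.modify r [] (fun ss => ss ++ [s])) := by
  rw [pvGet?_mapD]
  cases h : g.get? r with
  | none =>
    have hc : g.contains r = false := by rw [PySem.Dict.contains_eq_isSome_get?, h]; rfl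
    have hc2 : (pvMapD sailing_data g).contains r = false := by
      rw [PySem.Dict.contains_eq_isSome_get?, pvGet?_mapD, h]; rfl
    have hgd : g.getD r [] = [] := PySem.Dict.getD_of_not_contains g [] hc
    have hmod : g.modify r [] (fun ss => ss ++ [s]) = g.insert r ([] ++ [s]) := by
      rw [PySem.Dict.modify, hgd]
    simp only [Option.map_none]
    apply PySem.Dict.ext
    rw [hmod]
    show ((pvMapD sailing_data g).insert r s).items = (pvMapD sailing_data (g.insert r [s])).items
    rw [PySem.Dict.items_insert_of_not_contains _ _ hc2]
    show _ = ((g.insert r [s]).items).map (fun q => (q.1, pvCheapest q.2 sailing_data))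
    rw [PySem.Dict.items_insert_of_not_contains _ _ hc]
    simp only [List.map_append, List.map_cons, List.map_nil]
    rfl
  | some ss =>
    have hss : (r, ss) ∈ g.items := PySem.Dict.mem_items_of_get?_eq_some g h
    have hssne : ss ≠ [] := hne _ hss
    have hc : g.contains r = true := by rw [PySem.Dict.contains_eq_isSome_get?, h]; rfl
    have hc2 : (pvMapD sailing_data g).contains r = true := by
      rw [PySem.Dict.contains_eq_isSome_get?, pvGet?_mapD, h]; rfl
    have hgd : g.getD r [] = ss := PySem.Dict.getD_of_get?_eq_some g [] h
    have hmod : g.modify r [] (fun t => t ++ [s]) = g.insert r (ss ++ [s]) := by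
      rw [PySem.Dict.modify, hgd]
    have hbm : pvCheapest (ss ++ [s]) sailing_data =
        if pvCost sailing_data s < pvCost sailing_data (pvCheapest ss sailing_data) then s
        else pvCheapest ss sailing_data :=
      pvCheapest_append_singleton sailing_data ss s hssne
    have hval : ∀ p ∈ g.items, p.1 = r → p.2 = ss := by
      intro p hp hpr
      have := PySem.Dict.get?_of_mem_items g (k := p.1) (v := p.2) hp hnd
      rw [hpr, h] at this
      exact (Option.some_injective _ this.symm)
    simp only [Option.map_some]
    by_cases hlt : pvCost sailing_data s < pvCost sailing_data (pvCheapest ss sailing_data)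
    · rw [if_pos hlt]
      apply PySem.Dict.ext
      rw [hmod]
      show ((pvMapD sailing_data g).insert r s).items
          = ((g.insert r (ss ++ [s])).items).map (fun q => (q.1, pvCheapest q.2 sailing_data))
      rw [PySem.Dict.items_insert_of_contains _ _ hc2, PySem.Dict.items_insert_of_contains _ _ hc]
      show List.map _ (List.map _ g.items) = _
      simp only [List.map_map]
      apply List.map_congr_left
      intro p hp
      by_cases hpr : p.1 = r
      · simp [Function.comp, hpr, hbm, hlt]
      · simp [Function.comp, hpr]
    · rw [if_neg hlt]
      apply PySem.Dict.ext
      rw [hmod]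
      show (pvMapD sailing_data g).items
          = ((g.insert r (ss ++ [s])).items).map (fun q => (q.1, pvCheapest q.2 sailing_data))
      rw [PySem.Dict.items_insert_of_contains _ _ hc]
      show List.map _ g.items = _
      simp only [List.map_map]
      apply List.map_congr_left
      intro p hp
      by_cases hpr : p.1 = r
      · have hps := hval p hp hpr
        simp [Function.comp, hpr, hps, hbm, hlt]
      · simp [Function.comp, hpr]

lemma pvFold_eq (sailing_data : List (String × List (String × Int))) (ad : List (String × List (String × String)))
    (g : PySem.Dict String (List String)) (hnd : g.keys.Nodup) (hne : ∀ p ∈ g.items, p.2 ≠ []) :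
    ad.foldl (fun asgn kv =>
      let request := pvGetS kv.2 "request"
      let sailing := pvGetS kv.2 "sailing"
      match asgn.get? request with
      | none => asgn.insert request sailing
      | some curr_sailing =>
        if pvCost sailing_data sailing < pvCost sailing_data curr_sailing then
          asgn.insert request sailing
        else asgn) (pvMapD sailing_data g)
    = pvMapD sailing_data (ad.foldl (fun groups kv =>
        groups.modify (pvGetS kv.2 "request") [] (fun ss => ss ++ [pvGetS kv.2 "sailing"])) g) := by
  induction ad generalizing g with
  | nil => rfl
  | cons kv t ih =>
    simp only [List.foldl_cons]
    rw [pvStep_eq sailing_data g hnd hne (pvGetS kv.2 "request") (pvGetS kv.2 "sailing")]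
    have hmod : g.modify (pvGetS kv.2 "request") [] (fun ss => ss ++ [pvGetS kv.2 "sailing"])
        = g.insert (pvGetS kv.2 "request") (g.getD (pvGetS kv.2 "request") [] ++ [pvGetS kv.2 "sailing"]) := rfl
    apply ih
    · rw [hmod]; exact PySem.Dict.nodup_keys_insert g _ _ hnd
    · intro p hp
      rw [hmod] at hp
      rcases (PySem.Dict.mem_items_insert g _ _ p).mp hp with h1 | h2
      · subst h1; simp
      · exact hne _ h2.1

-- ===== VERDICT (by name: the statement is the Claim_ definition above) =====
theorem init_asgn_spec : Claim_equal_init_asgn := by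
  intro ad sd _ _
  unfold Spec_init_asgn init_asgn init_asgn_alt
  have h := pvFold_eq sd ad PySem.Dict.empty (by simp [PySem.Dict.keys_empty]) (by intro p hp; simp [PySem.Dict.empty] at hp)
  have he : pvMapD sd PySem.Dict.empty = PySem.Dict.empty := rfl
  rw [he] at h
  rw [h]
  simp [pvMapD, List.map_map, Function.comp]
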